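-- pv_equiv track=rewrite | github.com/jghughes/Zwift-Solution-2025 | Thon.Goodies.Jan2025/src/jgh_formulae03.py | generate_work_rider_mapping
-- ===== SOURCE A (Python) =====
-- def generate_work_rider_mapping(n: int):
--     """
--     Generates a mapping of work riders to tasks.
--
--     The row calculation is done as follows:
--     - k: The current work rider index, starting from 1 up to n.
--     - n: The total number of work riders/tasks.
--     - j: The current task index, starting from 0 up to n-1.
--     - k + n - j - 1: This expression adjusts the row index based on the current work rider and task.
--       By subtracting j and adding n - 1, we effectively rotate the rows in the desired pattern.
--     - % n: This modulo operation ensures that the row index wraps around when it exceeds n.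
--       For example, if n is 3, the row index will cycle through 1, 2, and 3.
--     - + 1: This adjusts the 0-based index (resulting from the modulo operation) to a 1-based index,
--       which matches the desired output format.
--
--     This calculation ensures that the rows are rotated in such a way that they match the specified pattern:
--     - For work_rider1, the rows are 1, 3, 2.
--     - For work_rider2, the rows are 2, 1, 3.
--     - For work_rider3, the rows are 3, 2, 1.
--
--     Args:
--         n (int): The number of work riders/tasks.
--
--     Returns:
--         dict: A dictionary mapping work riders to their respective tasks.
--     """
--     mapping = {}
--     for k in range(1, n + 1):
--         work_rider = []
--         for j in range(n):
--             row = (k + n - j - 1) % n + 1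
--             col = j + 1
--             work_rider.append((f"p{row}", f"t{col}"))
--         mapping[f"work_rider{k}"] = work_rider
--     return mapping
-- ===== SOURCE B (Python) =====
-- def generate_work_rider_mapping(n: int):
--     cols = [f"t{j + 1}" for j in range(n)]
--     base = [f"p{((-j) % n) + 1}" for j in range(n)]
--     mapping = {}
--     for k in range(1, n + 1):
--         s = (k - 1) % n
--         rot = base[n - s:] + base[:n - s]
--         mapping[f"work_rider{k}"] = list(zip(rot, cols))
--     return mapping
-- ===== Notes on version B (the rewrite author's own statement) =====
-- stated objective: alternative
-- what changed: B precomputes the fixed column list and one base row-label template, then builds each rider's row by right-rotating the template via list slicing and zipping it with the columns, instead of recomputing the modulo formula at every cell.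
import Mathlib
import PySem

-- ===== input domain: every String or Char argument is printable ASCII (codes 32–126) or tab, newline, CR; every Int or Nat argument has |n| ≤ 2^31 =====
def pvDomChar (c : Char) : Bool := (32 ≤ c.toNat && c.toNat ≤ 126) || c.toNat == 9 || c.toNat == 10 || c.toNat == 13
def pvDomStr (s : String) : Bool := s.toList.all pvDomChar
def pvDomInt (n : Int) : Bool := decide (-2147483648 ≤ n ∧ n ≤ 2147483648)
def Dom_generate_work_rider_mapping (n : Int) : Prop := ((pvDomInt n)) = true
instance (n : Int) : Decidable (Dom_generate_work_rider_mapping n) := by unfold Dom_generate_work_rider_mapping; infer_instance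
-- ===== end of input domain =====

-- B precomputes one row-label template and emits per-rider rotations of it by slicing,
-- zipped with a fixed column list, instead of recomputing the modulo formula at every cell
-- (objective: alternative decomposition; same asymptotic cost).

-- ===== PORT A =====
def generate_work_rider_mapping (n : Int) : List (String × List (String × String)) :=
  ((PySem.List.pyRange 1 (n + 1) 1).foldl (fun mapping k =>
      let work_rider := (PySem.List.pyRange 0 n 1).foldl (fun wr j =>
        let row := PySem.Int.mod (k + n - j - 1) n + 1
        let col := j + 1
        wr ++ [("p" ++ PySem.Int.toStr row, "t" ++ PySem.Int.toStr col)]) []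
      mapping.insert ("work_rider" ++ PySem.Int.toStr k) work_rider)
    PySem.Dict.empty).items

-- ===== PORT B =====
def generate_work_rider_mapping_alt (n : Int) : List (String × List (String × String)) :=
  let cols := (PySem.List.pyRange 0 n 1).map (fun j => "t" ++ PySem.Int.toStr (j + 1))
  let base := (PySem.List.pyRange 0 n 1).map (fun j => "p" ++ PySem.Int.toStr (PySem.Int.mod (-j) n + 1))
  ((PySem.List.pyRange 1 (n + 1) 1).foldl (fun mapping k =>
      let s := PySem.Int.mod (k - 1) n
      let rot := PySem.List.slice base (some (n - s)) none ++ PySem.List.slice base none (some (n - s))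
      mapping.insert ("work_rider" ++ PySem.Int.toStr k) (rot.zip cols))
    PySem.Dict.empty).items

-- ===== PRECONDITION & SPEC =====
def Spec_generate_work_rider_mapping (n : Int) (out : List (String × List (String × String))) : Prop := out = generate_work_rider_mapping_alt n
instance (n : Int) (out : List (String × List (String × String))) : Decidable (Spec_generate_work_rider_mapping n out) := by unfold Spec_generate_work_rider_mapping; infer_instance

-- ===== CLAIM (what is proved, stated in full; the proofs are below) =====
def Claim_equal_generate_work_rider_mapping : Prop := ∀ (n : Int), Dom_generate_work_rider_mapping n → Spec_generate_work_rider_mapping n (generate_work_rider_mapping n)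

-- ===== LEMMAS AND PROOFS =====

-- the per-rider inner lists coincide for every k the outer loop visits
lemma inner_eq (n k : Int) (h1 : 1 ≤ k) (h2 : k < n + 1) :
    ((PySem.List.pyRange 0 n 1).foldl (fun wr j =>
        wr ++ [("p" ++ PySem.Int.toStr (PySem.Int.mod (k + n - j - 1) n + 1),
                "t" ++ PySem.Int.toStr (j + 1))]) []) =
      ((PySem.List.slice ((PySem.List.pyRange 0 n 1).map (fun j => "p" ++ PySem.Int.toStr (PySem.Int.mod (-j) n + 1)))
          (some (n - PySem.Int.mod (k - 1) n)) none ++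
        PySem.List.slice ((PySem.List.pyRange 0 n 1).map (fun j => "p" ++ PySem.Int.toStr (PySem.Int.mod (-j) n + 1)))
          none (some (n - PySem.Int.mod (k - 1) n))).zip
        ((PySem.List.pyRange 0 n 1).map (fun j => "t" ++ PySem.Int.toStr (j + 1)))) := by
  have hn : 0 < n := by omega
  have hs : PySem.Int.mod (k - 1) n = k - 1 := by
    rw [PySem.Int.mod_eq_emod_of_pos hn]; exact Int.emod_eq_of_lt (by omega) (by omega)
  have hm : n - PySem.Int.mod (k - 1) n = ((n - k + 1).toNat : Int) := by rw [hs]; omega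
  rw [hm, PySem.List.slice_from_natCast, PySem.List.slice_to_natCast,
    PySem.List.foldl_append_singleton_eq_map]
  apply List.ext_getElem
  · simp [PySem.List.length_pyRange_one, List.length_zip]
    omega
  · intro i hL hR
    have key : ∀ a b : Int, a - b = 2 * n ∨ a - b = n →
        PySem.Int.mod a n = PySem.Int.mod b n := by
      intro a b hd
      rw [PySem.Int.mod_eq_emod_of_pos hn, PySem.Int.mod_eq_emod_of_pos hn]
      rcases hd with h | h
      · exact Int.ModEq.symm (Int.modEq_iff_dvd.mpr ⟨2, by omega⟩)
      · exact Int.ModEq.symm (Int.modEq_iff_dvd.mpr ⟨1, by omega⟩)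
    simp only [List.getElem_map, List.getElem_zip, List.getElem_append,
      List.getElem_drop, List.getElem_take, PySem.List.getElem_pyRange_one,
      List.length_nil, List.length_drop, List.length_map,
            PySem.List.length_pyRange_one, Nat.not_lt_zero, Nat.sub_zero,
      zero_add, Int.sub_zero] at *
    split_ifs with hF hin
    · exact hF.elim
    · exact hF.elim
    · rw [key (k + n - (i:Int) - 1) (-((((n - k + 1).toNat + i : Nat)) : Int)) (Or.inl (by omega))]
    · rw [key (k + n - (i:Int) - 1) (-(((i - (n.toNat - (n - k + 1).toNat) : Nat)) : Int)) (Or.inr (by omega))]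

-- ===== VERDICT (by name: the statement is the Claim_ definition above) =====
theorem generate_work_rider_mapping_spec : Claim_equal_generate_work_rider_mapping := by
  intro n _
  unfold Spec_generate_work_rider_mapping generate_work_rider_mapping generate_work_rider_mapping_alt
  congr 1
  apply PySem.List.foldl_congr_mem
  intro acc k hk
  rw [PySem.List.mem_pyRange_one] at hk
  rw [inner_eq n k hk.1 hk.2]
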